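-- pv_equiv track=rewrite | github.com/igfox/contextual_motifs | lib/data_generating_motifs.py | categorical_switch_points
-- ===== SOURCE A (Python) =====
-- def categorical_switch_points(arr):
--     """
--     Given a categorical array, finds points that switch from one category
--     to another, returning a sparse representation of the array.
--     """
--     switch_points = []
--     switch_start = 0
--     local_cat = arr[0]
--     for i in range(len(arr)):
--         if arr[i] != local_cat:
--             switch_points.append((switch_start, i-1, local_cat))
--             switch_start = i
--             local_cat = arr[i]
--     switch_points.append((switch_start, i, local_cat))
--     return switch_points
-- ===== SOURCE B (Python) =====
-- def categorical_switch_points(arr):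
--     """Two-stage boundary-table version: collect switch cuts, then pair
--     consecutive boundaries into inclusive segments."""
--     cuts = [(i, cur) for i, (prev, cur) in enumerate(zip(arr, arr[1:]), 1) if cur != prev]
--     starts = [(0, arr[0])] + cuts
--     ends = [i for i, _ in cuts] + [len(arr)]
--     return [(s, e - 1, c) for (s, c), e in zip(starts, ends)]
-- ===== Notes on version B (the rewrite author's own statement) =====
-- stated objective: alternative
-- what changed: Replaces A's single-pass accumulator loop (emit-while-scanning with mutable switch_start/local_cat) by a two-stage decomposition: first build a table of switch cuts from adjacent pairs, then zip consecutive boundaries into inclusive segments.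
import Mathlib
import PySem

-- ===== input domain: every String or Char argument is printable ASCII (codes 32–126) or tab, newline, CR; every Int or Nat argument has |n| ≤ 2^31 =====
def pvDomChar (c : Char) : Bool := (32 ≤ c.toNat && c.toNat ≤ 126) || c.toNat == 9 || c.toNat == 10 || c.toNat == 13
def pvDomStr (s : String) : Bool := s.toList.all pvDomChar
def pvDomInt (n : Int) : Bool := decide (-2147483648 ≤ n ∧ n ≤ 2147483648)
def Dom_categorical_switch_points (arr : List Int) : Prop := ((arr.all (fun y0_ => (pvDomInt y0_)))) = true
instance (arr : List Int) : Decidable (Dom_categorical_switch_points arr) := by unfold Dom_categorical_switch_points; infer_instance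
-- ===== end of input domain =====

-- B replaces A's single-pass emit-while-scanning accumulator by a boundary-table
-- two-stage construction (same O(n) cost); equivalence of the RETURN value is proved
-- for nonempty input (both Pythons raise IndexError on []).

-- ===== PORT A =====
-- literal port of A's loop: state = (switch_points, switch_start, local_cat),
-- iterated over range(len(arr)); after the loop i = len(arr)-1.
def categorical_switch_points (arr : List Int) : List (Int × Int × Int) :=
  match arr with
  | [] => []  -- arr[0] raises IndexError in Python; excluded by Pre_
  | a :: _ =>
    let st := (PySem.List.pyRange 0 arr.length 1).foldl
      (fun (s : List (Int × Int × Int) × Int × Int) i =>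
        let x := PySem.List.pyGetD arr i 0  -- arr[i]; i is in range(len(arr))
        if x ≠ s.2.2 then (s.1 ++ [(s.2.1, i - 1, s.2.2)], i, x) else s)
      ([], 0, a)
    st.1 ++ [(st.2.1, (arr.length : Int) - 1, st.2.2)]

-- ===== PORT B =====
def categorical_switch_points_alt (arr : List Int) : List (Int × Int × Int) :=
  let cuts := ((PySem.List.enumerate (arr.zip (PySem.List.slice arr (some 1) none)) 1).filter
      (fun p => p.2.2 ≠ p.2.1)).map (fun p => (p.1, p.2.2))
  let starts := ((0 : Int), PySem.List.pyGetD arr 0 0) :: cuts  -- arr[0]; nonempty by Pre_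
  let ends := cuts.map (·.1) ++ [(arr.length : Int)]
  (starts.zip ends).map (fun p => (p.1.1, p.2 - 1, p.1.2))

-- ===== PRECONDITION & SPEC =====
-- Pre_ excludes only the empty list, on which both A and B raise IndexError (arr[0]).
def Pre_categorical_switch_points (arr : List Int) : Prop := arr ≠ []
instance (arr : List Int) : Decidable (Pre_categorical_switch_points arr) := by
  unfold Pre_categorical_switch_points; infer_instance

def pvWitness_categorical_switch_points : List Int := [1, 1, 2]

def Spec_categorical_switch_points (arr : List Int) (out : List (Int × Int × Int)) : Prop :=
  out = categorical_switch_points_alt arr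
instance (arr : List Int) (out : List (Int × Int × Int)) :
    Decidable (Spec_categorical_switch_points arr out) := by
  unfold Spec_categorical_switch_points; infer_instance

-- ===== CLAIM (what is proved, stated in full; the proofs are below) =====
def Claim_equal_categorical_switch_points : Prop :=
  ∀ (arr : List Int), Dom_categorical_switch_points arr →
    Pre_categorical_switch_points arr →
    Spec_categorical_switch_points arr (categorical_switch_points arr)

-- ===== LEMMAS AND PROOFS =====

-- common reference: run-length segments of suffix t, current run started at s with
-- category c, next index i
def rleAux (s c i : Int) : List Int → List (Int × Int × Int)
  | [] => [(s, i - 1, c)]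
  | x :: t => if x ≠ c then (s, i - 1, c) :: rleAux i x (i + 1) t else rleAux s c (i + 1) t

-- structural cut table: (index, new category) at each switch point
def cutAux (c i : Int) : List Int → List (Int × Int)
  | [] => []
  | x :: t => if x ≠ c then (i, x) :: cutAux x (i + 1) t else cutAux c (i + 1) t

theorem rleAux_cons_eq (s c i x : Int) (t : List Int) (h : x = c) :
    rleAux s c i (x :: t) = rleAux s c (i + 1) t := by simp [rleAux, h]

theorem rleAux_cons_ne (s c i x : Int) (t : List Int) (h : x ≠ c) :
    rleAux s c i (x :: t) = (s, i - 1, c) :: rleAux i x (i + 1) t := by simp [rleAux, h]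

theorem cutAux_cons_eq (c i x : Int) (t : List Int) (h : x = c) :
    cutAux c i (x :: t) = cutAux c (i + 1) t := by simp [cutAux, h]

theorem cutAux_cons_ne (c i x : Int) (t : List Int) (h : x ≠ c) :
    cutAux c i (x :: t) = (i, x) :: cutAux x (i + 1) t := by simp [cutAux, h]

theorem foldA (step : (List (Int × Int × Int) × Int × Int) → Int × Int → List (Int × Int × Int) × Int × Int)
    (hstep : ∀ s p, step s p = if p.2 ≠ s.2.2 then (s.1 ++ [(s.2.1, p.1 - 1, s.2.2)], p.1, p.2) else s)
    (t : List Int) : ∀ (i : Int) (acc : List (Int × Int × Int)) (s c : Int),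
    (let r := (PySem.List.enumerate t i).foldl step (acc, s, c)
     r.1 ++ [(r.2.1, i + t.length - 1, r.2.2)]) = acc ++ rleAux s c i t := by
  induction t with
  | nil => intro i acc s c; simp [PySem.List.enumerate_nil, rleAux]
  | cons x t ih =>
    intro i acc s c
    rw [PySem.List.enumerate_cons]
    simp only [List.foldl_cons, hstep, List.length_cons]
    push_cast
    rw [show (i + (↑t.length + 1) - 1 : Int) = i + 1 + ↑t.length - 1 by ring]
    by_cases hx : x = c
    · rw [if_neg (show ¬ ((i, x).2 ≠ (acc, s, c).2.2) by simp [hx]), rleAux_cons_eq s c i x t hx]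
      exact ih (i + 1) acc s c
    · rw [if_pos (show (i, x).2 ≠ (acc, s, c).2.2 by simpa using hx),
        rleAux_cons_ne s c i x t hx]
      rw [ih (i + 1) (acc ++ [(s, i - 1, c)]) i x]
      simp

theorem cutB (t : List Int) : ∀ (c : Int) (i : Int),
    (((PySem.List.enumerate ((c :: t).zip t) i).filter (fun p => p.2.2 ≠ p.2.1)).map
      (fun p => (p.1, p.2.2))) = cutAux c i t := by
  induction t with
  | nil => intro c i; simp [PySem.List.enumerate_nil, cutAux]
  | cons x t ih =>
    intro c i
    rw [List.zip_cons_cons, PySem.List.enumerate_cons, List.filter_cons]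
    by_cases hx : x = c
    · subst hx
      rw [if_neg (by simp), cutAux_cons_eq x i x t rfl]
      exact ih x (i + 1)
    · rw [if_pos (by simp [hx]), List.map_cons, cutAux_cons_ne c i x t hx]
      rw [ih x (i + 1)]

theorem zipSeg (t : List Int) : ∀ (s c i : Int),
    ((((s, c) :: cutAux c i t).zip ((cutAux c i t).map (·.1) ++ [i + t.length])).map
      (fun p => (p.1.1, p.2 - 1, p.1.2))) = rleAux s c i t := by
  induction t with
  | nil => intro s c i; simp [cutAux, rleAux]
  | cons x t ih =>
    intro s c i
    simp only [List.length_cons]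
    push_cast
    rw [show (i + (↑t.length + 1) : Int) = (i + 1) + ↑t.length by ring]
    by_cases hx : x = c
    · rw [cutAux_cons_eq c i x t hx, rleAux_cons_eq s c i x t hx, ← hx]
      exact ih s x (i + 1)
    · rw [cutAux_cons_ne c i x t hx, rleAux_cons_ne s c i x t hx]
      simp only [List.map_cons, List.cons_append, List.zip_cons_cons, List.map_cons]
      rw [ih i x (i + 1)]

theorem portA_eq_rle (a : Int) (t : List Int) :
    categorical_switch_points (a :: t) = rleAux 0 a 1 t := by
  unfold categorical_switch_points
  simp only
  have key := foldA
    (step := fun (s : List (Int × Int × Int) × Int × Int) (p : Int × Int) =>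
      if p.2 ≠ s.2.2 then (s.1 ++ [(s.2.1, p.1 - 1, s.2.2)], p.1, p.2) else s)
    (fun _ _ => rfl) (a :: t) 0 [] 0 a
  rw [PySem.List.enumerate_eq_map_pyRange (a :: t) 0, List.foldl_map] at key
  simp only [List.length_cons, List.nil_append, zero_add, PySem.List.len_eq] at key ⊢
  rw [key, rleAux_cons_eq 0 a 0 a t rfl, zero_add]

theorem portB_eq_rle (a : Int) (t : List Int) :
    categorical_switch_points_alt (a :: t) = rleAux 0 a 1 t := by
  unfold categorical_switch_points_alt
  simp only [PySem.List.slice_from_one, List.tail_cons, PySem.List.pyGetD_zero_cons,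
    List.length_cons]
  rw [cutB t a 1]
  have := zipSeg t 0 a 1
  rw [show ((1 : Int) + ↑t.length) = (↑(t.length + 1) : Int) by push_cast; ring] at this
  exact this

-- ===== VERDICT (by name: the statement is the Claim_ definition above) =====
theorem categorical_switch_points_spec : Claim_equal_categorical_switch_points := by
  intro arr _ hpre
  unfold Spec_categorical_switch_points
  match arr with
  | [] => exact absurd rfl hpre
  | a :: t => rw [portA_eq_rle, portB_eq_rle]
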